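-- pv_equiv track=rewrite | github.com/schiob/TestingSistemas | ene-jun-2019/Karla Berlanga Vazquez/Practica 2/numeros.py | clasificacion
-- ===== SOURCE A (Python) =====
-- def clasificacion(num_enteros):
--     #Revisamos que la entrada de datos sea correcta
--     try:
--         lista = list(map(int, num_enteros.split())) #convetimos la lista string a int
--         pass
--     except ValueError:
--         return ("Entrada de datos inválida")
--
--     resultados= [ #Se gurdan los resultados en una lista
--     [i for i in lista if i > 0], #cuando los números son positivos
--     [i for i in lista if i < 0], #Cuando los numeros son negativos
--     [i for i in lista if i % 2 == 0], #Cuando los números son pares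
--     [i for i in lista if i % 2 != 0], #Cuando los numeros son impares
--     [i for i in lista if i == 0] #Cuando los números son cero
--     ]
--
--     #Se retorna el string con los resultados
--     return """
--     {} número(s) positivo(s) \n{} número(s) negativo(s)\n{} número(s) par(es)\n{} número(s) impar(es)
--     """.format(len(resultados[0]), len(resultados[1]), len(resultados[2]), len(resultados[3])).strip()
-- ===== SOURCE B (Python) =====
-- def clasificacion(num_enteros):
--     try:
--         lista = list(map(int, num_enteros.split()))
--     except ValueError:
--         return ("Entrada de datos inválida")
--     pos = neg = par = impar = 0
--     for i in lista:
--         if i > 0: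
--             pos += 1
--         if i < 0:
--             neg += 1
--         if i % 2 == 0:
--             par += 1
--         else:
--             impar += 1
--     return "{} número(s) positivo(s) \n{} número(s) negativo(s)\n{} número(s) par(es)\n{} número(s) impar(es)".format(pos, neg, par, impar)
-- ===== Notes on version B (the rewrite author's own statement) =====
-- stated objective: simpler
-- what changed: Replaces the five materialized filter-comprehension lists (plus the unused zeros list) and their len() calls with four scalar counters updated in a single pass over the parsed integers; the padded template plus .strip() is replaced by the plain format string.
import Mathlib
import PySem

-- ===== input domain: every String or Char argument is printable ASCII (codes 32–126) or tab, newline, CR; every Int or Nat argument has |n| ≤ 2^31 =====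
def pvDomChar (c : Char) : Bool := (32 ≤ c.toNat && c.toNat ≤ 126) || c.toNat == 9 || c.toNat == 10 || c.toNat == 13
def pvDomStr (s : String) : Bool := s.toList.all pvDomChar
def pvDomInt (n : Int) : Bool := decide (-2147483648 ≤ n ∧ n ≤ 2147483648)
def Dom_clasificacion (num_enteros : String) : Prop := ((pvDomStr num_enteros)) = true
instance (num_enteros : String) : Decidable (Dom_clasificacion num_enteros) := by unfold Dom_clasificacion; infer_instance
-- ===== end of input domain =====

-- B replaces A's five materialized filter lists (one of them unused) and their lengths by four
-- scalar counters maintained in a single pass, and formats without the padded template + strip.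

-- shared helper: list(map(int, s.split())) under try/except ValueError — identical code in A and B
def pvParseInts : List String → Option (List Int)
  | [] => some []
  | t :: ts =>
    match PySem.Int.ofStr? t, pvParseInts ts with
    | some i, some l => some (i :: l)
    | _, _ => none

-- ===== PORT A =====
def clasificacion (num_enteros : String) : String :=
  match pvParseInts (PySem.Str.split₀ num_enteros) with
  | none => "Entrada de datos inválida"
  | some lista =>
    let positivos := lista.filter (fun i => decide (i > 0))
    let negativos := lista.filter (fun i => decide (i < 0))
    let pares := lista.filter (fun i => PySem.Int.mod i 2 == 0)
    let impares := lista.filter (fun i => !(PySem.Int.mod i 2 == 0))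
    let _ceros := lista.filter (fun i => decide (i = 0))  -- computed and never used, as in A
    String.ofList (PySem.Chars.strip
      ('\n' :: ' ' :: ' ' :: ' ' :: ' ' ::
        (PySem.Int.toChars positivos.length ++ (" número(s) positivo(s) \n".toList ++
         (PySem.Int.toChars negativos.length ++ (" número(s) negativo(s)\n".toList ++
         (PySem.Int.toChars pares.length ++ (" número(s) par(es)\n".toList ++
         (PySem.Int.toChars impares.length ++ (" número(s) impar(es)".toList ++
         ['\n', ' ', ' ', ' ', ' ']))))))))))

-- ===== PORT B =====
def pvStep (acc : Int × Int × Int × Int) (i : Int) : Int × Int × Int × Int :=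
  let acc := if i > 0 then (acc.1 + 1, acc.2.1, acc.2.2.1, acc.2.2.2) else acc
  let acc := if i < 0 then (acc.1, acc.2.1 + 1, acc.2.2.1, acc.2.2.2) else acc
  if PySem.Int.mod i 2 == 0 then (acc.1, acc.2.1, acc.2.2.1 + 1, acc.2.2.2)
  else (acc.1, acc.2.1, acc.2.2.1, acc.2.2.2 + 1)

def clasificacion_alt (num_enteros : String) : String :=
  match pvParseInts (PySem.Str.split₀ num_enteros) with
  | none => "Entrada de datos inválida"
  | some lista =>
    let c := lista.foldl pvStep (0, 0, 0, 0)
    String.ofList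
      (PySem.Int.toChars c.1 ++ (" número(s) positivo(s) \n".toList ++
       (PySem.Int.toChars c.2.1 ++ (" número(s) negativo(s)\n".toList ++
       (PySem.Int.toChars c.2.2.1 ++ (" número(s) par(es)\n".toList ++
       (PySem.Int.toChars c.2.2.2 ++ " número(s) impar(es)".toList)))))))

-- ===== PRECONDITION & SPEC =====
def Spec_clasificacion (num_enteros : String) (out : String) : Prop := out = clasificacion_alt num_enteros
instance (num_enteros : String) (out : String) : Decidable (Spec_clasificacion num_enteros out) := by unfold Spec_clasificacion; infer_instance

-- ===== CLAIM (what is proved, stated in full; the proofs are below) =====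
def Claim_equal_clasificacion : Prop := ∀ (num_enteros : String), Dom_clasificacion num_enteros → Spec_clasificacion num_enteros (clasificacion num_enteros)

-- ===== LEMMAS AND PROOFS =====

lemma pv_digitChar_nonspace (m : Nat) (hm : m < 10) :
    PySem.Chars.isspace (Nat.digitChar m) = false := by
  interval_cases m <;> decide

-- every character produced by Nat.toDigitsCore is a previous accumulator character or a digit char, hence not whitespace
lemma pv_toDigitsCore_nonspace : ∀ (f n : Nat) (ds : List Char),
    (∀ c ∈ ds, PySem.Chars.isspace c = false) →
    ∀ c ∈ Nat.toDigitsCore 10 f n ds, PySem.Chars.isspace c = false := by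
  intro f
  induction f with
  | zero => intro n ds hds c hc; exact hds c (by simpa [Nat.toDigitsCore] using hc)
  | succ f ih =>
    intro n ds hds c hc
    have hdig : ∀ x ∈ Nat.digitChar (n % 10) :: ds, PySem.Chars.isspace x = false := by
      intro x hx
      rcases List.mem_cons.mp hx with hx | hx
      · subst hx; exact pv_digitChar_nonspace _ (Nat.mod_lt _ (by norm_num))
      · exact hds x hx
    rw [Nat.toDigitsCore] at hc
    by_cases hz : n / 10 = 0
    · rw [if_pos hz] at hc
      exact hdig c hc
    · rw [if_neg hz] at hc
      exact ih (n / 10) _ hdig c hc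

lemma pv_toDigitsCore_ne_nil : ∀ (f n : Nat) (ds : List Char), ds ≠ [] →
    Nat.toDigitsCore 10 f n ds ≠ [] := by
  intro f
  induction f with
  | zero => intro n ds h; simpa [Nat.toDigitsCore] using h
  | succ f ih =>
    intro n ds h
    rw [Nat.toDigitsCore]
    by_cases hz : n / 10 = 0
    · rw [if_pos hz]; simp
    · rw [if_neg hz]; exact ih (n / 10) _ (by simp)

-- str(n) of a nonnegative int starts with a non-whitespace character
lemma pv_toChars_head (n : Int) (h : 0 ≤ n) :
    ∃ hd tl, PySem.Int.toChars n = hd :: tl ∧ PySem.Chars.isspace hd = false := by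
  have hx : PySem.Int.toChars n = Nat.toDigits 10 n.toNat := by
    simp [PySem.Int.toChars, not_lt.mpr h]
  have hne : Nat.toDigits 10 n.toNat ≠ [] := by
    rw [Nat.toDigits, Nat.toDigitsCore]
    by_cases hz : n.toNat / 10 = 0
    · rw [if_pos hz]; simp
    · rw [if_neg hz]; exact pv_toDigitsCore_ne_nil _ _ _ (by simp)
  obtain ⟨hd, tl, heq⟩ := List.exists_cons_of_ne_nil hne
  refine ⟨hd, tl, hx.trans heq, ?_⟩
  refine pv_toDigitsCore_nonspace (n.toNat + 1) n.toNat [] (by simp) hd ?_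
  rw [← Nat.toDigits, heq]; simp

lemma pv_lstrip_pad (hd : Char) (tl : List Char) (h : PySem.Chars.isspace hd = false) :
    PySem.Chars.lstrip ('\n' :: ' ' :: ' ' :: ' ' :: ' ' :: hd :: tl) = hd :: tl := by
  have s1 : PySem.Chars.isspace '\n' = true := by decide
  have s2 : PySem.Chars.isspace ' ' = true := by decide
  simp [PySem.Chars.lstrip, List.dropWhile_cons, s1, s2, h]

lemma pv_rstrip_pad (init : List Char) :
    PySem.Chars.rstrip ((init ++ [')']) ++ ['\n', ' ', ' ', ' ', ' ']) = init ++ [')'] := by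
  have s1 : PySem.Chars.isspace '\n' = true := by decide
  have s2 : PySem.Chars.isspace ' ' = true := by decide
  have s3 : PySem.Chars.isspace ')' = false := by decide
  simp [PySem.Chars.rstrip, List.reverse_append, List.dropWhile_cons, s1, s2, s3]

-- strip removes exactly the "\n    " padding A wraps around the body
lemma pv_strip_wrap (body init : List Char) (hd : Char) (tl : List Char)
    (hb : body = hd :: tl) (h1 : PySem.Chars.isspace hd = false)
    (hlast : body = init ++ [')']) :
    PySem.Chars.strip ('\n' :: ' ' :: ' ' :: ' ' :: ' ' :: (body ++ ['\n', ' ', ' ', ' ', ' '])) = body := by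
  rw [PySem.Chars.strip]
  have hl : PySem.Chars.lstrip ('\n' :: ' ' :: ' ' :: ' ' :: ' ' :: (body ++ ['\n', ' ', ' ', ' ', ' '])) =
      body ++ ['\n', ' ', ' ', ' ', ' '] := by
    rw [hb]
    simpa using pv_lstrip_pad hd (tl ++ ['\n', ' ', ' ', ' ', ' ']) h1
  rw [hl, hlast, pv_rstrip_pad]

-- the single-pass fold computes the four counts A obtains from its filter lists
lemma pv_fold_counts : ∀ (l : List Int) (a b c d : Int),
    l.foldl pvStep (a, b, c, d) =
      (a + (l.countP (fun i => decide (i > 0)) : Int),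
       b + (l.countP (fun i => decide (i < 0)) : Int),
       c + (l.countP (fun i => PySem.Int.mod i 2 == 0) : Int),
       d + (l.countP (fun i => !(PySem.Int.mod i 2 == 0)) : Int)) := by
  intro l
  induction l with
  | nil => intro a b c d; simp
  | cons x xs ih =>
    intro a b c d
    simp only [List.foldl_cons, List.countP_cons]
    have hstep : pvStep (a, b, c, d) x =
        ((if x > 0 then a + 1 else a), (if x < 0 then b + 1 else b),
         (if PySem.Int.mod x 2 == 0 then c + 1 else c),
         (if PySem.Int.mod x 2 == 0 then d else d + 1)) := by
      simp only [pvStep]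
      split_ifs <;> rfl
    rw [hstep, ih]
    by_cases hx : x > 0 <;> by_cases hn : x < 0 <;>
      by_cases he : (PySem.Int.mod x 2 == 0) = true <;>
        simp only [hx, hn, he, decide_true, decide_false, if_true, if_false, decide_eq_true_eq,
          Bool.not_true, Bool.not_false, Prod.ext_iff, Prod.mk.injEq] <;>
          (try simp [hx, hn, he]) <;> push_cast <;> omega

-- ===== VERDICT (by name: the statement is the Claim_ definition above) =====
theorem clasificacion_spec : Claim_equal_clasificacion := by
  intro s _
  unfold Spec_clasificacion clasificacion clasificacion_alt
  cases hp : pvParseInts (PySem.Str.split₀ s) with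
  | none => rfl
  | some lista =>
    simp only [pv_fold_counts lista 0 0 0 0, zero_add, List.countP_eq_length_filter]
    obtain ⟨hd, tl, hhd, hsp⟩ :=
      pv_toChars_head ((lista.filter (fun i => decide (i > 0))).length : Int) (by positivity)
    congr 1
    rw [show (PySem.Int.toChars ((lista.filter (fun i => decide (i > 0))).length : Int) ++ (" número(s) positivo(s) \n".toList ++
         (PySem.Int.toChars ((lista.filter (fun i => decide (i < 0))).length : Int) ++ (" número(s) negativo(s)\n".toList ++
         (PySem.Int.toChars ((lista.filter (fun i => PySem.Int.mod i 2 == 0)).length : Int) ++ (" número(s) par(es)\n".toList ++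
         (PySem.Int.toChars ((lista.filter (fun i => !(PySem.Int.mod i 2 == 0))).length : Int) ++ (" número(s) impar(es)".toList ++
         ['\n', ' ', ' ', ' ', ' '])))))))) =
        ((PySem.Int.toChars ((lista.filter (fun i => decide (i > 0))).length : Int) ++ (" número(s) positivo(s) \n".toList ++
         (PySem.Int.toChars ((lista.filter (fun i => decide (i < 0))).length : Int) ++ (" número(s) negativo(s)\n".toList ++
         (PySem.Int.toChars ((lista.filter (fun i => PySem.Int.mod i 2 == 0)).length : Int) ++ (" número(s) par(es)\n".toList ++
         (PySem.Int.toChars ((lista.filter (fun i => !(PySem.Int.mod i 2 == 0))).length : Int) ++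
          " número(s) impar(es)".toList))))))) ++ ['\n', ' ', ' ', ' ', ' ']) from by simp]
    refine pv_strip_wrap _
      (PySem.Int.toChars ((lista.filter (fun i => decide (i > 0))).length : Int) ++ (" número(s) positivo(s) \n".toList ++
       (PySem.Int.toChars ((lista.filter (fun i => decide (i < 0))).length : Int) ++ (" número(s) negativo(s)\n".toList ++
       (PySem.Int.toChars ((lista.filter (fun i => PySem.Int.mod i 2 == 0)).length : Int) ++ (" número(s) par(es)\n".toList ++
       (PySem.Int.toChars ((lista.filter (fun i => !(PySem.Int.mod i 2 == 0))).length : Int) ++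
        " número(s) impar(es".toList)))))))
      hd
      (tl ++ (" número(s) positivo(s) \n".toList ++
       (PySem.Int.toChars ((lista.filter (fun i => decide (i < 0))).length : Int) ++ (" número(s) negativo(s)\n".toList ++
       (PySem.Int.toChars ((lista.filter (fun i => PySem.Int.mod i 2 == 0)).length : Int) ++ (" número(s) par(es)\n".toList ++
       (PySem.Int.toChars ((lista.filter (fun i => !(PySem.Int.mod i 2 == 0))).length : Int) ++
        " número(s) impar(es)".toList)))))))
      ?_ hsp ?_
    · rw [hhd]; simp
    · have h : " número(s) impar(es)".toList = " número(s) impar(es".toList ++ [')'] := by decide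
      rw [h]; simp
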